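-- pv_equiv track=rewrite | github.com/kclab922/Algorithm | lv_2_programmers/R_더맵게/sol.py | solution
-- ===== SOURCE A (Python) =====
-- from heapq import heappush, heappop, heapify
--
-- def solution(sco, K):
--     heapify(sco)
--     count = 0
--
--     while sco[0] < K:
--         heappush(sco, heappop(sco)+heappop(sco)*2)
--         count += 1
--
--         if len(sco) == 1 and sco[0] < K:
--             return -1
--
--     return count
-- ===== SOURCE B (Python) =====
-- def solution(sco, K):
--     s = sorted(sco)
--     count = 0
--     while s[0] < K:
--         x = s[0]
--         y = s[1]
--         s = s[2:]
--         new = x + y * 2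
--         k = 0
--         while k < len(s) and s[k] < new:
--             k += 1
--         s.insert(k, new)
--         count += 1
--         if len(s) == 1 and s[0] < K:
--             return -1
--     return count
-- ===== Notes on version B (the rewrite author's own statement) =====
-- stated objective: alternative
-- what changed: Replaced the heapq binary heap by a sorted list: sort once, repeatedly take the two smallest from the front and insert the combined value back at its sorted position found by a linear scan.
import Mathlib
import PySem

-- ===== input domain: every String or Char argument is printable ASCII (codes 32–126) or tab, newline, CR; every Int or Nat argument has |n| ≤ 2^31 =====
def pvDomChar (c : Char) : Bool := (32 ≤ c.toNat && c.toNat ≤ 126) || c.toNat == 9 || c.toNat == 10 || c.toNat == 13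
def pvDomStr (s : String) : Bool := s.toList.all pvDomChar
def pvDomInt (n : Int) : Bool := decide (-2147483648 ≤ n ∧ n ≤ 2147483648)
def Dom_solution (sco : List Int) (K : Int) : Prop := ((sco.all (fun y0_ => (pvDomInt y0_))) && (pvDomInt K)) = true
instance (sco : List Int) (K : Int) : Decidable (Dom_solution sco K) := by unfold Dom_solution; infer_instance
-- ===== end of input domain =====

-- B replaces A's heapq binary heap by a sorted list maintained with a linear-scan
-- insertion (alternative data structure, not claimed faster).  A mutates sco in
-- place (heapifies it); B does not — the equivalence proved here is about the
-- return value only.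

-- ===== PORT A =====
-- A calls heapq.heapify/heappush/heappop; PySem has no heap primitives, so those
-- three are hand-ported below following CPython's heapq.py step for step
-- (_siftdown's and _siftup's while loops become the structural recursions
-- siftdownLoop / siftupLoop over the same state; exact on the in-range indices
-- these internal helpers are called with).

def pvG (l : List Int) (i : Nat) : Int := PySem.List.pyGetD l (i : Int) 0
def pvS (l : List Int) (i : Nat) (v : Int) : List Int := PySem.List.pySetD l (i : Int) v

-- heapq._siftdown(heap, startpos, pos): its while loop, with newitem = heap[pos]
-- read once by the caller (heapq reads it on entry).
-- (each while loop below carries a structural fuel argument, always called with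
-- enough fuel for the loop to reach its Python exit condition — a totality
-- device only, the branch structure is Python's)
def siftdownLoop (startpos : Nat) (newitem : Int) : Nat → List Int → Nat → List Int
  | 0, l, pos => pvS l pos newitem
  | fuel + 1, l, pos =>
    if startpos < pos then
      let parentpos := (pos - 1) / 2
      let parent := pvG l parentpos
      if newitem < parent then siftdownLoop startpos newitem fuel (pvS l pos parent) parentpos
      else pvS l pos newitem
    else pvS l pos newitem

def siftdownP (l : List Int) (startpos pos : Nat) : List Int :=
  siftdownLoop startpos (pvG l pos) pos l pos

-- heapq._siftup(heap, pos): the descend-to-leaf while loop; returns the list and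
-- the final pos (Python mutates the local variable pos).
def siftupLoop (endpos : Nat) : Nat → List Int → Nat → Nat → List Int × Nat
  | 0, l, pos, _ => (l, pos)
  | fuel + 1, l, pos, childpos =>
    if childpos < endpos then
      if childpos + 1 < endpos ∧ ¬ pvG l childpos < pvG l (childpos + 1) then
        siftupLoop endpos fuel (pvS l pos (pvG l (childpos + 1))) (childpos + 1) (2 * (childpos + 1) + 1)
      else
        siftupLoop endpos fuel (pvS l pos (pvG l childpos)) childpos (2 * childpos + 1)
    else (l, pos)

-- heapq._siftup: loop, then heap[pos] = newitem, then _siftdown(heap, startpos, pos)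
def siftupP (l : List Int) (pos : Nat) : List Int :=
  let endpos := l.length
  let newitem := pvG l pos
  let r := siftupLoop endpos l.length l pos (2 * pos + 1)
  siftdownP (pvS r.1 r.2 newitem) pos r.2

-- heapq.heappush(heap, item)
def heappushP (l : List Int) (item : Int) : List Int :=
  siftdownP (l ++ [item]) 0 l.length

-- heapq.heappop(heap): lastelt = heap.pop(); if heap: swap root out and _siftup
def heappopP (l : List Int) : Int × List Int :=
  match PySem.List.pop? l (-1) with
  | none => (0, [])  -- heap.pop() raises IndexError on an empty heap (outside Pre_)
  | some (lastelt, rest) =>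
    if rest.isEmpty then (lastelt, rest)
    else (pvG rest 0, siftupP (pvS rest 0 lastelt) 0)

-- heapq.heapify(x): for i in reversed(range(n//2)): _siftup(x, i)
-- (reversed(range(n//2)) ported as (List.range (n/2)).reverse — both enumerate
-- n//2-1, …, 1, 0 exactly)
def heapifyP (l : List Int) : List Int :=
  ((List.range (l.length / 2)).reverse).foldl (fun h i => siftupP h i) l

-- length facts the recursion in loopA needs (cited by decreasing_by)
-- the while loop of solution (A)
def loopA (K : Int) : Nat → List Int → Int → Int
  | 0, _, count => count
  | fuel + 1, heap, count =>
    if pvG heap 0 < K then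
      if 2 ≤ heap.length then
        let p1 := heappopP heap
        let p2 := heappopP p1.2
        let h3 := heappushP p2.2 (p1.1 + p2.1 * 2)
        if h3.length = 1 ∧ pvG h3 0 < K then -1
        else loopA K fuel h3 (count + 1)
      else -1  -- Python raises IndexError here (second heappop of a singleton); outside Pre_
    else count

def solution (sco : List Int) (K : Int) : Int :=
  loopA K (heapifyP sco).length (heapifyP sco) 0

-- ===== PORT B =====
-- B: sort once; repeatedly take the two smallest from the front and insert the
-- combined value back at its sorted position found by a linear scan.

-- the inner `while k < len(s) and s[k] < new: k += 1` scan
def insLoop (s : List Int) (v : Int) : Nat → Nat → Nat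
  | 0, k => k
  | fuel + 1, k => if k < s.length ∧ pvG s k < v then insLoop s v fuel (k + 1) else k

-- the outer while loop of B
def loopB (K : Int) : Nat → List Int → Int → Int
  | 0, _, count => count
  | fuel + 1, s, count =>
    if pvG s 0 < K then
      if 2 ≤ s.length then
        let x := pvG s 0
        let y := pvG s 1
        let s1 := PySem.List.slice s (some 2) none     -- s = s[2:]
        let nv := x + y * 2
        let k := insLoop s1 nv s1.length 0
        let s2 := PySem.List.insert s1 (k : Int) nv    -- s.insert(k, new)
        if s2.length = 1 ∧ pvG s2 0 < K then -1
        else loopB K fuel s2 (count + 1)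
      else -1  -- Python raises IndexError here (s[1] of a singleton); outside Pre_
    else count

def solution_alt (sco : List Int) (K : Int) : Int :=
  loopB K (PySem.List.sorted sco (fun x => x) false).length
    (PySem.List.sorted sco (fun x => x) false) 0

-- ===== PRECONDITION & SPEC =====
-- Pre_ excludes exactly the inputs on which A raises IndexError: the empty list
-- (sco[0] fails) and a single-element list below K (the second heappop fails).
def Pre_solution (sco : List Int) (K : Int) : Prop :=
  sco ≠ [] ∧ (sco.length = 1 → K ≤ pvG sco 0)
instance (sco : List Int) (K : Int) : Decidable (Pre_solution sco K) := by
  unfold Pre_solution; infer_instance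

def pvWitness_solution : List Int × Int := ([1, 2, 9], 6)

def Spec_solution (sco : List Int) (K : Int) (out : Int) : Prop := out = solution_alt sco K
instance (sco : List Int) (K : Int) (out : Int) : Decidable (Spec_solution sco K out) := by
  unfold Spec_solution; infer_instance

-- ===== CLAIM (what is proved, stated in full; the proofs are below) =====
def Claim_equal_solution : Prop :=
  ∀ (sco : List Int) (K : Int), Dom_solution sco K → Pre_solution sco K →
    Spec_solution sco K (solution sco K)

-- ===== LEMMAS AND PROOFS =====

theorem length_siftdownLoop (startpos : Nat) (newitem : Int) (fuel : Nat) (l : List Int)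
    (pos : Nat) : (siftdownLoop startpos newitem fuel l pos).length = l.length := by
  induction fuel generalizing l pos with
  | zero => simp [siftdownLoop, pvS]
  | succ n ih => rw [siftdownLoop]; dsimp only; split_ifs <;> simp [pvS, ih]

theorem length_siftupLoop (endpos fuel : Nat) (l : List Int) (pos childpos : Nat) :
    (siftupLoop endpos fuel l pos childpos).1.length = l.length := by
  induction fuel generalizing l pos childpos with
  | zero => simp [siftupLoop]
  | succ n ih => rw [siftupLoop]; split_ifs <;> simp [pvS, ih]

theorem length_siftupP (l : List Int) (pos : Nat) :
    (siftupP l pos).length = l.length := by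
  simp [siftupP, siftdownP, length_siftdownLoop, length_siftupLoop, pvS]

theorem pop?_nil : PySem.List.pop? ([] : List Int) (-1) = none := by
  simp [PySem.List.pop?, PySem.List.pyIdx?]

theorem pop?_neg_one (l : List Int) (h : l ≠ []) :
    PySem.List.pop? l (-1) = some (l.getLast h, l.dropLast) := by
  conv_lhs => rw [← List.dropLast_append_getLast h]
  exact PySem.List.pop?_last _ _

theorem length_heappopP_snd (l : List Int) : (heappopP l).2.length = l.length - 1 := by
  rcases eq_or_ne l [] with rfl | h
  · simp [heappopP, pop?_nil]
  · unfold heappopP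
    rw [pop?_neg_one l h]
    have hd : l.dropLast.length = l.length - 1 := by simp
    by_cases he : l.dropLast.isEmpty <;> simp [he, length_siftupP, pvS, hd]

theorem pvG_eq (l : List Int) (i : Nat) : pvG l i = l.getD i 0 := by
  simp [pvG]

theorem pvS_eq (l : List Int) (i : Nat) (v : Int) : pvS l i v = l.set i v := by
  simp [pvS]

theorem pvG_lt (l : List Int) (i : Nat) (h : i < l.length) : pvG l i = l[i] := by
  simp [pvG_eq, List.getD_eq_getElem?_getD, List.getElem?_eq_getElem h]

theorem pvG_set_self (l : List Int) (i : Nat) (v : Int) (h : i < l.length) :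
    pvG (l.set i v) i = v := by
  rw [pvG_lt _ _ (by simpa using h)]
  simp [h]

theorem pvG_set_ne (l : List Int) (i j : Nat) (v : Int) (h : i ≠ j) :
    pvG (l.set i v) j = pvG l j := by
  simp [pvG_eq, List.getD_eq_getElem?_getD, List.getElem?_set, h]

-- edge p c: c is a child slot of p in the implicit binary heap
def edge (p c : Nat) : Prop := c = 2 * p + 1 ∨ c = 2 * p + 2

-- j lies in the subtree rooted at r (follow parents from j up to r)
def inSub (r j : Nat) : Bool :=
  if j < r then false else if j = r then true else inSub r ((j - 1) / 2)
termination_by j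
decreasing_by omega

theorem inSub_self (r : Nat) : inSub r r = true := by
  rw [inSub]; simp

theorem le_of_inSub {r j : Nat} (h : inSub r j = true) : r ≤ j := by
  rw [inSub] at h
  split_ifs at h <;> omega

theorem inSub_parent {r j : Nat} (h : inSub r j = true) (hne : j ≠ r) :
    inSub r ((j - 1) / 2) = true := by
  rw [inSub] at h
  split_ifs at h <;> simp_all

theorem inSub_child {r p c : Nat} (h : inSub r p = true) (he : edge p c) :
    inSub r c = true := by
  have hrp := le_of_inSub h
  have hpc : p < c := by rcases he with h1 | h1 <;> omega
  rw [inSub]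
  have : (c - 1) / 2 = p := by rcases he with h1 | h1 <;> omega
  simp only [this]
  split_ifs with h1 h2
  · omega
  · rfl
  · exact h

theorem not_inSub_child {r p c : Nat} (h : inSub r p = false) (he : edge p c)
    (hc : c ≠ r) : inSub r c = false := by
  rw [inSub]
  have : (c - 1) / 2 = p := by rcases he with h1 | h1 <;> omega
  simp only [this]
  split_ifs <;> simp_all

theorem inSub_zero (j : Nat) : inSub 0 j = true := by
  induction j using Nat.strong_induction_on with
  | _ j ih =>
    rw [inSub]
    split_ifs with h1 h2
    · omega
    · rfl
    · exact ih _ (by omega)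

-- multiset bookkeeping for the sift moves
theorem perm_set_set (l : List Int) (p q : Nat) (x : Int)
    (hp : p < l.length) (hq : q < l.length) (hpq : p ≠ q) :
    ((l.set p (pvG l q)).set q x).Perm (l.set p x) := by
  rw [List.perm_iff_count]
  intro v
  have h1 : q < (l.set p (pvG l q)).length := by simpa using hq
  rw [List.count_set h1, List.count_set hp, List.count_set hp]
  have h2 : (l.set p (pvG l q))[q] = l[q] := by
    rw [List.getElem_set_ne (by omega)]
  rw [h2, pvG_lt _ _ hq]
  have hle : (if (l[p] == v) = true then 1 else 0) ≤ l.count v := by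
    split_ifs with h
    · have hv : l[p] = v := by simpa using h
      exact List.count_pos_iff.mpr (hv ▸ List.getElem_mem hp)
    · omega
  split_ifs <;> omega

theorem set_pvG_self (l : List Int) (p : Nat) (hp : p < l.length) :
    l.set p (pvG l p) = l := by
  rw [pvG_lt _ _ hp]; exact List.set_getElem_self hp

-- ===== the _siftdown (bubble-up) loop =====
theorem siftdownLoop_spec (start : Nat) (ni : Int) :
    ∀ (fuel : Nat) (l : List Int) (pos : Nat), pos ≤ fuel → pos < l.length →
    inSub start pos = true →
    (∀ p c, edge p c → c < l.length → inSub start p = true → c ≠ pos →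
        pvG (l.set pos ni) p ≤ pvG (l.set pos ni) c) →
    (start < pos → ∀ c, edge pos c → c < l.length → pvG l ((pos - 1) / 2) ≤ pvG l c) →
    (siftdownLoop start ni fuel l pos).length = l.length ∧
    (siftdownLoop start ni fuel l pos).Perm (l.set pos ni) ∧
    (∀ j, inSub start j = false → pvG (siftdownLoop start ni fuel l pos) j = pvG l j) ∧
    (∀ p c, edge p c → c < l.length → inSub start p = true →
        pvG (siftdownLoop start ni fuel l pos) p ≤ pvG (siftdownLoop start ni fuel l pos) c) := by
  intro fuel
  induction fuel with
  | zero =>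
    intro l pos hfuel hlen hsub I2 I3
    have hpos0 : pos = 0 := by omega
    subst hpos0
    rw [siftdownLoop]
    simp only [pvS_eq]
    refine ⟨by simp, List.Perm.refl _, ?_, ?_⟩
    · intro j hj
      have hjpos : (0 : Nat) ≠ j := by
        intro e
        rw [← e, hsub] at hj
        cases hj
      exact pvG_set_ne _ _ _ _ hjpos
    · intro p c he hc hsp
      have hcpos : c ≠ 0 := by rcases he with h | h <;> omega
      exact I2 p c he hc hsp hcpos
  | succ fuel ih =>
    intro l pos hfuel hlen hsub I2 I3
    rw [siftdownLoop]
    by_cases hgt : start < pos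
    · rw [if_pos hgt]
      simp only
      by_cases hswap : ni < pvG l ((pos - 1) / 2)
      · rw [if_pos hswap]
        simp only [pvS_eq]
        set pp := (pos - 1) / 2 with hpp
        set parent := pvG l pp with hpar
        have hpplen : pp < l.length := by omega
        have hsubpp : inSub start pp = true := inSub_parent hsub (by omega)
        have hA : ∀ j, j ≠ pp → j ≠ pos → pvG ((l.set pos parent).set pp ni) j = pvG l j := by
          intro j h1 h2
          rw [pvG_set_ne _ _ _ _ (Ne.symm h1), pvG_set_ne _ _ _ _ (Ne.symm h2)]
        have hApp : pvG ((l.set pos parent).set pp ni) pp = ni :=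
          pvG_set_self _ _ _ (by simpa using hpplen)
        have hApos : pvG ((l.set pos parent).set pp ni) pos = parent := by
          rw [pvG_set_ne _ _ _ _ (by omega : pp ≠ pos)]
          exact pvG_set_self _ _ _ hlen
        have hA0 : ∀ j, j ≠ pos → pvG (l.set pos ni) j = pvG l j := fun j h =>
          pvG_set_ne _ _ _ _ (Ne.symm h)
        have I2' : ∀ p c, edge p c → c < (l.set pos parent).length → inSub start p = true →
            c ≠ pp → pvG ((l.set pos parent).set pp ni) p ≤ pvG ((l.set pos parent).set pp ni) c := by
          intro p c he hc hsp hcpp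
          have hclen : c < l.length := by simpa using hc
          have hpc : p < c := by rcases he with h | h <;> omega
          by_cases h1 : c = pos
          · subst h1
            have hppp : pp = p := by rcases he with h | h <;> omega
            rw [← hppp, hApp, hApos]
            omega
          · by_cases h2 : p = pp
            · subst h2
              rw [hApp, hA c hcpp h1]
              have h5 := I2 pp c he hclen hsp h1
              rw [hA0 pp (by omega), hA0 c h1] at h5
              omega
            · by_cases h3 : p = pos
              · subst h3
                rw [hApos, hA c hcpp h1]
                have h5 := I3 hgt c he hclen
                rw [hpar, hpp]
                exact h5
              · rw [hA p h2 h3, hA c hcpp h1]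
                have h5 := I2 p c he hclen hsp h1
                rw [hA0 p h3, hA0 c h1] at h5
                exact h5
        have I3' : start < pp → ∀ c, edge pp c → c < (l.set pos parent).length →
            pvG (l.set pos parent) ((pp - 1) / 2) ≤ pvG (l.set pos parent) c := by
          intro h4 c he hc
          have hclen : c < l.length := by simpa using hc
          have hedge_gp : edge ((pp - 1) / 2) pp := by unfold edge; omega
          have hsubgp : inSub start ((pp - 1) / 2) = true := inSub_parent hsubpp (by omega)
          have h5 := I2 _ pp hedge_gp hpplen hsubgp (by omega)
          rw [hA0 _ (by omega), hA0 pp (by omega)] at h5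
          rw [pvG_set_ne _ _ _ _ (by omega : pos ≠ (pp - 1) / 2)]
          by_cases h6 : c = pos
          · subst h6
            rw [pvG_set_self _ _ _ hlen]
            omega
          · rw [pvG_set_ne _ _ _ _ (Ne.symm h6)]
            have h7 := I2 pp c he hclen hsubpp h6
            rw [hA0 pp (by omega), hA0 c h6] at h7
            omega
        obtain ⟨L, P, Loc, E⟩ := ih (l.set pos parent) pp (by omega) (by simpa using hpplen)
          hsubpp I2' I3'
        refine ⟨by simpa using L, ?_, ?_, ?_⟩
        · refine P.trans ?_
          have h8 := perm_set_set l pos pp ni hlen hpplen (by omega)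
          rw [← hpar] at h8
          exact h8
        · intro j hj
          have hjpos : pos ≠ j := by
            intro e
            rw [← e, hsub] at hj
            cases hj
          rw [Loc j hj, pvG_set_ne _ _ _ _ hjpos]
        · intro p c he hc hsp
          exact E p c he (by simpa using hc) hsp
      · rw [if_neg hswap]
        simp only [pvS_eq]
        refine ⟨by simp, List.Perm.refl _, ?_, ?_⟩
        · intro j hj
          have hjpos : pos ≠ j := by
            intro e
            rw [← e, hsub] at hj
            cases hj
          exact pvG_set_ne _ _ _ _ hjpos
        · intro p c he hc hsp
          by_cases h1 : c = pos
          · have hppp : p = (pos - 1) / 2 := by rcases he with h | h <;> omega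
            have hplt : p < pos := by rcases he with h | h <;> omega
            rw [h1, pvG_set_ne _ _ _ _ (by omega : pos ≠ p), pvG_set_self _ _ _ hlen, hppp]
            omega
          · exact I2 p c he hc hsp h1
    · rw [if_neg hgt]
      simp only [pvS_eq]
      refine ⟨by simp, List.Perm.refl _, ?_, ?_⟩
      · intro j hj
        have hjpos : pos ≠ j := by
          intro e
          rw [← e, hsub] at hj
          cases hj
        exact pvG_set_ne _ _ _ _ hjpos
      · intro p c he hc hsp
        have hcpos : c ≠ pos := by
          intro e
          have h9 := le_of_inSub hsp
          have h10 := le_of_inSub hsub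
          rcases he with h | h <;> omega
        exact I2 p c he hc hsp hcpos

-- ===== the _siftup descend loop =====
theorem siftupLoop_spec (start : Nat) (ni : Int) :
    ∀ (fuel endpos : Nat) (l : List Int) (pos childpos : Nat),
    endpos - childpos ≤ fuel → endpos = l.length → pos < l.length →
    childpos = 2 * pos + 1 → inSub start pos = true →
    (∀ p c, edge p c → c < l.length → inSub start p = true → p ≠ pos → c ≠ pos →
        pvG l p ≤ pvG l c) →
    (start < pos → ∀ c, edge pos c → c < l.length → pvG l ((pos - 1) / 2) ≤ pvG l c) →
    (siftupLoop endpos fuel l pos childpos).1.length = l.length ∧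
    (siftupLoop endpos fuel l pos childpos).2 < l.length ∧
    inSub start (siftupLoop endpos fuel l pos childpos).2 = true ∧
    ((siftupLoop endpos fuel l pos childpos).1.set (siftupLoop endpos fuel l pos childpos).2 ni).Perm
      (l.set pos ni) ∧
    (∀ j, inSub start j = false → pvG (siftupLoop endpos fuel l pos childpos).1 j = pvG l j) ∧
    endpos ≤ 2 * (siftupLoop endpos fuel l pos childpos).2 + 1 ∧
    (∀ p c, edge p c → c < l.length → inSub start p = true →
        p ≠ (siftupLoop endpos fuel l pos childpos).2 → c ≠ (siftupLoop endpos fuel l pos childpos).2 →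
        pvG (siftupLoop endpos fuel l pos childpos).1 p ≤ pvG (siftupLoop endpos fuel l pos childpos).1 c) := by
  intro fuel
  induction fuel with
  | zero =>
    intro endpos l pos childpos hfuel hend hpos hcp hsub J1 J2
    rw [siftupLoop]
    exact ⟨rfl, hpos, hsub, List.Perm.refl _, fun j _ => rfl, by omega, fun p c he hc hs hp hcne => J1 p c he hc hs hp hcne⟩
  | succ n ihn =>
    intro endpos l pos childpos hfuel hend hpos hcp hsub J1 J2
    rw [siftupLoop]
    by_cases hlt : childpos < endpos
    · rw [if_pos hlt]
      have main : ∀ cp', (cp' = childpos ∨ cp' = childpos + 1) → cp' < endpos →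
          (∀ c, edge pos c → c < endpos → pvG l cp' ≤ pvG l c) →
          (siftupLoop endpos n (pvS l pos (pvG l cp')) cp' (2 * cp' + 1)).1.length = l.length ∧
          (siftupLoop endpos n (pvS l pos (pvG l cp')) cp' (2 * cp' + 1)).2 < l.length ∧
          inSub start (siftupLoop endpos n (pvS l pos (pvG l cp')) cp' (2 * cp' + 1)).2 = true ∧
          ((siftupLoop endpos n (pvS l pos (pvG l cp')) cp' (2 * cp' + 1)).1.set
            (siftupLoop endpos n (pvS l pos (pvG l cp')) cp' (2 * cp' + 1)).2 ni).Perm (l.set pos ni) ∧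
          (∀ j, inSub start j = false →
            pvG (siftupLoop endpos n (pvS l pos (pvG l cp')) cp' (2 * cp' + 1)).1 j = pvG l j) ∧
          endpos ≤ 2 * (siftupLoop endpos n (pvS l pos (pvG l cp')) cp' (2 * cp' + 1)).2 + 1 ∧
          (∀ p c, edge p c → c < l.length → inSub start p = true →
              p ≠ (siftupLoop endpos n (pvS l pos (pvG l cp')) cp' (2 * cp' + 1)).2 →
              c ≠ (siftupLoop endpos n (pvS l pos (pvG l cp')) cp' (2 * cp' + 1)).2 →
              pvG (siftupLoop endpos n (pvS l pos (pvG l cp')) cp' (2 * cp' + 1)).1 p ≤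
                pvG (siftupLoop endpos n (pvS l pos (pvG l cp')) cp' (2 * cp' + 1)).1 c) := by
        intro cp' hor hcple hmin
        rw [pvS_eq]
        have hcplen : cp' < l.length := by omega
        have hcpe : edge pos cp' := by unfold edge; rcases hor with rfl | rfl <;> omega
        have hppne : pos ≠ cp' := by omega
        have hsub' : inSub start cp' = true := inSub_child hsub hcpe
        have hval : ∀ j, j ≠ pos → pvG (l.set pos (pvG l cp')) j = pvG l j := by
          intro j h1
          exact pvG_set_ne _ _ _ _ (Ne.symm h1)
        have hvpos : pvG (l.set pos (pvG l cp')) pos = pvG l cp' := pvG_set_self _ _ _ hpos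
        have J1' : ∀ p c, edge p c → c < (l.set pos (pvG l cp')).length → inSub start p = true →
            p ≠ cp' → c ≠ cp' → pvG (l.set pos (pvG l cp')) p ≤ pvG (l.set pos (pvG l cp')) c := by
          intro p c he hc hsp hp1 hc1
          have hclen : c < l.length := by simpa using hc
          have hpc : p < c := by rcases he with h | h <;> omega
          by_cases h1 : c = pos
          · subst h1
            have hppp : p = (c - 1) / 2 := by rcases he with h | h <;> omega
            have hcs : start < c := by
              have h10 := le_of_inSub hsp
              have h11 := le_of_inSub hsub
              omega
            rw [hval p (by omega), hvpos]
            have h5 := J2 hcs cp' hcpe (by omega)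
            rw [← hppp] at h5
            exact h5
          · by_cases h2 : p = pos
            · subst h2
              rw [hvpos, hval c h1]
              exact hmin c he (by omega)
            · rw [hval p h2, hval c h1]
              exact J1 p c he hclen hsp h2 h1
        have J2' : start < cp' → ∀ c, edge cp' c → c < (l.set pos (pvG l cp')).length →
            pvG (l.set pos (pvG l cp')) ((cp' - 1) / 2) ≤ pvG (l.set pos (pvG l cp')) c := by
          intro _ c he hc
          have hclen : c < l.length := by simpa using hc
          have hgp : (cp' - 1) / 2 = pos := by rcases hcpe with h | h <;> omega
          have hcgt : pos < cp' := by rcases hcpe with h | h <;> omega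
          have hcgt2 : cp' < c := by rcases he with h | h <;> omega
          rw [hgp, hvpos, hval c (by omega)]
          exact J1 cp' c he hclen hsub' (by omega) (by omega)
        obtain ⟨C1, C2, C3, C4, C5, C6, C7⟩ :=
          ihn endpos (l.set pos (pvG l cp')) cp' (2 * cp' + 1)
            (by rcases hor with rfl | rfl <;> omega) (by simpa using hend) (by simpa using hcplen) rfl hsub' J1' J2'
        refine ⟨by simpa using C1, by simpa using C2, C3, ?_, ?_, C6, ?_⟩
        · exact C4.trans (perm_set_set l pos cp' ni hpos hcplen hppne)
        · intro j hj
          have hjpos : j ≠ pos := by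
            intro e
            rw [e, hsub] at hj
            cases hj
          rw [C5 j hj, hval j hjpos]
        · intro p c he hc hs hp1 hc1
          exact C7 p c he (by simpa using hc) hs hp1 hc1
      split_ifs with hcond
      · refine main (childpos + 1) (Or.inr rfl) hcond.1 ?_
        intro c he hc
        have h1 := hcond.2
        rcases he with h | h
        · have : c = childpos := by omega
          subst this
          omega
        · have : c = childpos + 1 := by omega
          subst this
          exact le_refl _
      · refine main childpos (Or.inl rfl) hlt ?_
        intro c he hc
        rcases he with h | h
        · have : c = childpos := by omega
          subst this
          exact le_refl _
        · have : c = childpos + 1 := by omega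
          subst this
          rcases Decidable.not_and_iff_not_or_not.mp hcond with h1 | h1
          · omega
          · have := Decidable.not_not.mp h1
            omega
    · rw [if_neg hlt]
      exact ⟨rfl, hpos, hsub, List.Perm.refl _, fun j _ => rfl, by omega, fun p c he hc hs hp hcne => J1 p c he hc hs hp hcne⟩

-- ===== _siftup = descend + place + bubble up =====
theorem siftupP_spec (l : List Int) (pos : Nat) (hpos : pos < l.length)
    (H : ∀ p c, edge p c → c < l.length → inSub pos p = true → p ≠ pos →
        pvG l p ≤ pvG l c) :
    (siftupP l pos).length = l.length ∧ (siftupP l pos).Perm l ∧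
    (∀ j, inSub pos j = false → pvG (siftupP l pos) j = pvG l j) ∧
    (∀ p c, edge p c → c < l.length → inSub pos p = true →
        pvG (siftupP l pos) p ≤ pvG (siftupP l pos) c) := by
  obtain ⟨C1, C2, C3, C4, C5, C6, C7⟩ :=
    siftupLoop_spec pos (pvG l pos) l.length l.length l pos (2 * pos + 1)
      (by omega) rfl hpos rfl (inSub_self pos)
      (fun p c he hc hs hp _ => H p c he hc hs hp)
      (fun h => absurd h (lt_irrefl pos))
  have hres : siftupP l pos =
      siftdownLoop pos
        (pvG (pvS (siftupLoop l.length l.length l pos (2 * pos + 1)).1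
          (siftupLoop l.length l.length l pos (2 * pos + 1)).2 (pvG l pos))
          (siftupLoop l.length l.length l pos (2 * pos + 1)).2)
        (siftupLoop l.length l.length l pos (2 * pos + 1)).2
        (pvS (siftupLoop l.length l.length l pos (2 * pos + 1)).1
          (siftupLoop l.length l.length l pos (2 * pos + 1)).2 (pvG l pos))
        (siftupLoop l.length l.length l pos (2 * pos + 1)).2 := rfl
  set r := siftupLoop l.length l.length l pos (2 * pos + 1) with hrdef
  set ni := pvG l pos with hnidef
  have hni2 : pvG (pvS r.1 r.2 ni) r.2 = ni := by
    rw [pvS_eq]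
    exact pvG_set_self _ _ _ (by omega)
  rw [hres, hni2, pvS_eq]
  have hset2 : (r.1.set r.2 ni).set r.2 ni = r.1.set r.2 ni := List.set_set ni
  obtain ⟨D1, D2, D3, D4⟩ :=
    siftdownLoop_spec pos ni r.2 (r.1.set r.2 ni) r.2 (le_refl _)
      (by simp only [List.length_set]; omega) C3
      (by
        rw [hset2]
        intro p c he hc hs hcne
        have hclen : c < l.length := by simp only [List.length_set] at hc; omega
        by_cases hp : p = r.2
        · subst hp
          have : c < l.length := hclen
          rcases he with h | h <;> omega
        · rw [pvG_set_ne _ _ _ _ (Ne.symm hp), pvG_set_ne _ _ _ _ (Ne.symm hcne)]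
          exact C7 p c he hclen hs hp hcne)
      (by
        intro hlt c he hc
        have hclen : c < l.length := by simp only [List.length_set] at hc; omega
        rcases he with h | h <;> omega)
  have hA : r.1.set r.2 ni = pvS r.1 r.2 ni := (pvS_eq _ _ _).symm
  refine ⟨by simp only [List.length_set] at D1; omega, ?_, ?_, ?_⟩
  · refine (D2.trans ?_)
    rw [hset2]
    refine C4.trans ?_
    rw [hnidef]
    rw [set_pvG_self l pos hpos]
  · intro j hj
    have hjr : j ≠ r.2 := by
      intro e
      rw [e, C3] at hj
      cases hj
    rw [D3 j hj, pvG_set_ne _ _ _ _ (Ne.symm hjr), C5 j hj]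
  · intro p c he hc hs
    exact D4 p c he (by simp only [List.length_set]; omega) hs

def IsHeap (l : List Int) : Prop :=
  ∀ p c, edge p c → c < l.length → pvG l p ≤ pvG l c

theorem heapify_spec (l : List Int) :
    (heapifyP l).length = l.length ∧ (heapifyP l).Perm l ∧ IsHeap (heapifyP l) := by
  have main : ∀ (k : Nat) (m : List Int), k ≤ m.length / 2 →
      (∀ p c, edge p c → c < m.length → k ≤ p → pvG m p ≤ pvG m c) →
      (((List.range k).reverse).foldl (fun h i => siftupP h i) m).length = m.length ∧
      (((List.range k).reverse).foldl (fun h i => siftupP h i) m).Perm m ∧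
      (∀ p c, edge p c →
          c < (((List.range k).reverse).foldl (fun h i => siftupP h i) m).length →
          pvG (((List.range k).reverse).foldl (fun h i => siftupP h i) m) p ≤
            pvG (((List.range k).reverse).foldl (fun h i => siftupP h i) m) c) := by
    intro k
    induction k with
    | zero =>
      intro m _ hgood
      exact ⟨rfl, List.Perm.refl _, fun p c he hc => hgood p c he hc (by omega)⟩
    | succ k ihk =>
      intro m hk hgood
      have hklen : k < m.length := by omega
      obtain ⟨S1, S2, S3, S4⟩ := siftupP_spec m k hklen (by
        intro p c he hc hs hp
        have := le_of_inSub hs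
        exact hgood p c he hc (by omega))
      have hstep : (List.range (k + 1)).reverse = k :: (List.range k).reverse := by
        rw [List.range_succ]
        simp
      rw [hstep, List.foldl_cons]
      have hgood' : ∀ p c, edge p c → c < (siftupP m k).length → k ≤ p →
          pvG (siftupP m k) p ≤ pvG (siftupP m k) c := by
        intro p c he hc hkp
        have hclen : c < m.length := by omega
        by_cases hp : inSub k p = true
        · exact S4 p c he hclen hp
        · have hpk : p ≠ k := by
            intro e
            rw [e, inSub_self] at hp
            exact hp rfl
          have hck : c ≠ k := by
            have : p < c := by rcases he with h | h <;> omega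
            omega
          have hcs : inSub k c = false :=
            not_inSub_child (Bool.not_eq_true _ ▸ (by simpa using hp)) he hck
          rw [S3 p (by simpa using hp), S3 c hcs]
          exact hgood p c he hclen (by omega)
      obtain ⟨T1, T2, T3⟩ := ihk (siftupP m k) (by omega) hgood'
      exact ⟨by omega, T2.trans S2, T3⟩
  have hbase : ∀ p c, edge p c → c < l.length → l.length / 2 ≤ p → pvG l p ≤ pvG l c := by
    intro p c he hc hp
    rcases he with h | h <;> omega
  obtain ⟨T1, T2, T3⟩ := main (l.length / 2) l le_rfl hbase
  unfold IsHeap heapifyP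
  exact ⟨T1, T2, T3⟩

theorem pvG_append_left (l : List Int) (v : Int) (j : Nat) (h : j < l.length) :
    pvG (l ++ [v]) j = pvG l j := by
  rw [pvG_lt _ _ (by simp; omega), pvG_lt _ _ h, List.getElem_append_left h]

theorem heappush_spec (l : List Int) (v : Int) (hl : IsHeap l) :
    (heappushP l v).Perm (v :: l) ∧ IsHeap (heappushP l v) := by
  have hni : pvG (l ++ [v]) l.length = v := by
    rw [pvG_lt _ _ (by simp)]
    simp
  have hAe : (l ++ [v]).set l.length v = l ++ [v] := by
    rw [List.set_append]
    simp
  have hres : heappushP l v =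
      siftdownLoop 0 (pvG (l ++ [v]) l.length) l.length (l ++ [v]) l.length := rfl
  obtain ⟨D1, D2, D3, D4⟩ := siftdownLoop_spec 0 (pvG (l ++ [v]) l.length) l.length (l ++ [v])
    l.length (le_refl _) (by simp) (inSub_zero _)
    (by
      rw [hni, hAe]
      intro p c he hc hs hcne
      have hpc : p < c := by rcases he with h | h <;> omega
      have hclen : c < l.length := by simp at hc; omega
      rw [pvG_append_left _ _ _ (by omega), pvG_append_left _ _ _ hclen]
      exact hl p c he hclen)
    (by
      intro _ c he hc
      simp at hc
      rcases he with h | h <;> omega)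
  rw [hni] at D2 D4 hres
  rw [hAe] at D2
  constructor
  · rw [hres]
    exact D2.trans (List.perm_append_singleton v l)
  · intro p c he hc
    rw [hres]
    refine D4 p c he ?_ (inSub_zero _)
    have := length_siftdownLoop 0 v l.length (l ++ [v]) l.length
    rw [hres] at hc
    omega

theorem heappop_spec (l : List Int) (hl : IsHeap l) (hne : l ≠ []) :
    (heappopP l).1 = pvG l 0 ∧ (heappopP l).2.Perm l.tail ∧ IsHeap (heappopP l).2 := by
  rw [heappopP, pop?_neg_one l hne]
  by_cases hdl : l.dropLast.isEmpty
  · -- l is a singleton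
    have hlen1 : l.length = 1 := by
      have h1 := List.isEmpty_iff.mp hdl
      have h2 := congrArg List.length h1
      simp at h2
      have := List.length_pos_of_ne_nil hne
      omega
    simp only [hdl, if_pos]
    refine ⟨?_, ?_, ?_⟩
    · rw [List.getLast_eq_getElem, pvG_lt _ _ (by omega)]
      congr 1
      omega
    · rw [List.isEmpty_iff.mp hdl]
      have : l.tail.length = 0 := by simp; omega
      rw [List.length_eq_zero_iff.mp this]
    · intro p c he hc
      rw [List.isEmpty_iff.mp hdl] at hc
      simp at hc
  · have hlen2 : 2 ≤ l.length := by
      have h1 : l.dropLast ≠ [] := by simpa [List.isEmpty_iff] using hdl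
      have h2 := List.length_pos_of_ne_nil h1
      simp at h2
      omega
    simp only [hdl, if_neg, Bool.false_eq_true, not_false_iff]
    set le := l.getLast hne with hle
    set l2 := pvS l.dropLast 0 le with hl2
    have hl2len : l2.length = l.length - 1 := by
      rw [hl2, pvS_eq]
      simp
    have hl2val : ∀ j, j ≠ 0 → j < l2.length → pvG l2 j = pvG l j := by
      intro j hj hjl
      rw [hl2, pvS_eq, pvG_set_ne _ _ _ _ (Ne.symm hj), pvG_lt _ _ (by simp; omega),
        pvG_lt _ _ (by omega), List.getElem_dropLast]
    obtain ⟨S1, S2, S3, S4⟩ := siftupP_spec l2 0 (by omega) (by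
      intro p c he hc hs hp
      have hpc : p < c := by rcases he with h | h <;> omega
      rw [hl2val p (by omega) (by omega), hl2val c (by omega) hc]
      exact hl p c he (by omega))
    refine ⟨?_, ?_, ?_⟩
    · rw [pvG_lt _ _ (by simp; omega), pvG_lt _ _ (by omega), List.getElem_dropLast]
    · refine S2.trans ?_
      -- l2 ~ l.tail
      obtain ⟨a, t, rfl⟩ : ∃ a t, l = a :: t := by
        rcases l with _ | ⟨a, t⟩
        · exact absurd rfl hne
        · exact ⟨a, t, rfl⟩
      have htne : t ≠ [] := by
        intro e
        rw [e] at hlen2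
        simp at hlen2
      have h3 : (a :: t).dropLast = a :: t.dropLast := by
        rw [List.dropLast_cons_of_ne_nil htne]
      have h4 : le = t.getLast htne := by
        rw [hle, List.getLast_cons htne]
      rw [hl2, pvS_eq, h3, h4]
      show (t.getLast htne :: t.dropLast).Perm t
      have h5 : (t.dropLast ++ [t.getLast htne]).Perm (t.getLast htne :: t.dropLast) :=
        List.perm_append_singleton _ _
      have h6 : t.dropLast ++ [t.getLast htne] = t := List.dropLast_append_getLast htne
      exact (h6 ▸ h5).symm
    · intro p c he hc
      refine S4 p c he ?_ (inSub_zero _)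
      omega

theorem root_min (l : List Int) (hl : IsHeap l) :
    ∀ j, j < l.length → pvG l 0 ≤ pvG l j := by
  intro j
  induction j using Nat.strong_induction_on with
  | _ j ih =>
    intro hj
    rcases Nat.eq_zero_or_pos j with rfl | hpos
    · exact le_refl _
    · have he : edge ((j - 1) / 2) j := by unfold edge; omega
      exact le_trans (ih _ (by omega) (by omega)) (hl _ j he hj)

theorem heads_eq (heap s : List Int) (hperm : heap.Perm s) (hheap : IsHeap heap)
    (hs : s.Pairwise (· ≤ ·)) : pvG heap 0 = pvG s 0 := by
  rcases s with _ | ⟨s0, sr⟩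
  · rw [List.Perm.eq_nil hperm]
  · obtain ⟨h0, hr, rfl⟩ : ∃ h0 hr, heap = h0 :: hr := by
      rcases heap with _ | ⟨h0, hr⟩
      · have := hperm.length_eq
        simp at this
      · exact ⟨h0, hr, rfl⟩
    have e1 : pvG (h0 :: hr) 0 = h0 := by simp [pvG_eq]
    have e2 : pvG (s0 :: sr) 0 = s0 := by simp [pvG_eq]
    rw [e1, e2]
    have hmem : h0 ∈ s0 :: sr := hperm.subset List.mem_cons_self
    have hs0le : s0 ≤ h0 := by
      rcases List.mem_cons.mp hmem with rfl | hm
      · exact le_refl _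
      · exact List.rel_of_pairwise_cons hs hm
    have hmem2 : s0 ∈ h0 :: hr := hperm.symm.subset List.mem_cons_self
    obtain ⟨j, hj, hje⟩ := List.getElem_of_mem hmem2
    have h5 := root_min _ hheap j hj
    rw [e1, pvG_lt _ _ hj, hje] at h5
    omega

-- B-side: the scan finds the sorted insertion point
theorem insLoop_spec (s : List Int) (v : Int) :
    ∀ (fuel k : Nat), s.length - k ≤ fuel → k ≤ s.length → (∀ i, i < k → pvG s i < v) →
    k ≤ insLoop s v fuel k ∧ insLoop s v fuel k ≤ s.length ∧
    (∀ i, i < insLoop s v fuel k → pvG s i < v) ∧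
    (insLoop s v fuel k < s.length → v ≤ pvG s (insLoop s v fuel k)) := by
  intro fuel
  induction fuel with
  | zero =>
    intro k hfuel hk hlt
    rw [insLoop]
    exact ⟨le_refl _, hk, hlt, fun hc => by omega⟩
  | succ fuel ih =>
    intro k hfuel hk hlt
    rw [insLoop]
    by_cases h : k < s.length ∧ pvG s k < v
    · rw [if_pos h]
      obtain ⟨I1, I2, I3, I4⟩ := ih (k + 1) (by omega) (by omega) (by
        intro i hi
        rcases Nat.lt_or_ge i k with h1 | h1
        · exact hlt i h1
        · have : i = k := by omega
          subst this
          exact h.2)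
      exact ⟨by omega, I2, I3, I4⟩
    · rw [if_neg h]
      rcases Decidable.not_and_iff_not_or_not.mp h with h1 | h1
      · exact ⟨le_refl _, by omega, hlt, fun hc => absurd hc h1⟩
      · exact ⟨le_refl _, hk, hlt, fun _ => by omega⟩

theorem insert_sorted (s : List Int) (v : Int) (hs : s.Pairwise (· ≤ ·)) :
    (s.take (insLoop s v s.length 0) ++ v :: s.drop (insLoop s v s.length 0)).Pairwise (· ≤ ·) ∧
    (s.take (insLoop s v s.length 0) ++ v :: s.drop (insLoop s v s.length 0)).Perm (v :: s) := by
  obtain ⟨I1, I2, I3, I4⟩ := insLoop_spec s v s.length 0 (by omega) (by omega)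
    (fun i hi => absurd hi (Nat.not_lt_zero i))
  set r := insLoop s v s.length 0 with hr
  have hsg : ∀ i j (hi : i < s.length) (hj : j < s.length), i ≤ j → s[i] ≤ s[j] := by
    intro i j hi hj hij
    rcases Nat.eq_or_lt_of_le hij with rfl | h
    · exact le_refl _
    · exact List.pairwise_iff_getElem.mp hs i j hi hj h
  constructor
  · rw [List.pairwise_append]
    refine ⟨List.Pairwise.sublist (List.take_sublist r s) hs, ?_, ?_⟩
    · rw [List.pairwise_cons]
      refine ⟨?_, List.Pairwise.sublist (List.drop_sublist r s) hs⟩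
      intro y hy
      obtain ⟨j, hj, hje⟩ := List.getElem_of_mem hy
      have hl : (s.drop r).length = s.length - r := List.length_drop
      have hjlen : r + j < s.length := by omega
      rw [List.getElem_drop] at hje
      have hrlen : r < s.length := by omega
      have h1 : v ≤ s[r] := by
        have := I4 hrlen
        rwa [pvG_lt _ _ hrlen] at this
      have h2 : s[r] ≤ s[r + j] := hsg r (r + j) hrlen hjlen (by omega)
      rw [← hje]
      omega
    · intro x hx y hy
      obtain ⟨i, hi, hie⟩ := List.mem_take_iff_getElem.mp hx
      have hxv : x < v := by
        have := I3 i (by omega)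
        rwa [pvG_lt _ _ (by omega), hie] at this
      rcases List.mem_cons.mp hy with rfl | hy2
      · omega
      · obtain ⟨j, hj, hje⟩ := List.getElem_of_mem hy2
        have hl : (s.drop r).length = s.length - r := List.length_drop
        have hjlen : r + j < s.length := by omega
        rw [List.getElem_drop] at hje
        have h2 : s[i] ≤ s[r + j] := hsg i (r + j) (by omega) hjlen (by omega)
        rw [← hje, ← hie]
        omega
  · refine List.perm_middle.trans ?_
    rw [List.take_append_drop]

-- ===== the two loops compute the same result =====
theorem tail_perm (a b : List Int) (h : a.Perm b) (hh : pvG a 0 = pvG b 0)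
    (hne : a ≠ []) : a.tail.Perm b.tail := by
  rcases a with _ | ⟨x, xs⟩
  · exact absurd rfl hne
  · rcases b with _ | ⟨y, ys⟩
    · have := h.length_eq
      simp at this
    · have hxy : x = y := by simpa [pvG_eq] using hh
      rw [hxy] at h
      simpa using h.cons_inv

theorem loop_eq : ∀ (fuel : Nat) (heap s : List Int) (K count : Int),
    heap.Perm s → IsHeap heap → s.Pairwise (· ≤ ·) →
    loopA K fuel heap count = loopB K fuel s count := by
  intro fuel
  induction fuel with
  | zero =>
    intro heap s K count hperm hheap hs
    rw [loopA, loopB]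
  | succ n ihn =>
    intro heap s K count hperm hheap hs
    have hE0 := heads_eq heap s hperm hheap hs
    have hL := hperm.length_eq
    rw [loopA, loopB, hE0, ← hL]
    by_cases hK : pvG s 0 < K
    case neg => rw [if_neg hK, if_neg hK]
    case pos =>
      rw [if_pos hK, if_pos hK]
      by_cases h2 : 2 ≤ heap.length
      case neg => rw [if_neg h2, if_neg h2]
      case pos =>
        rw [if_pos h2, if_pos h2]
        dsimp only
        obtain ⟨s0, s1, sr, rfl⟩ : ∃ s0 s1 sr, s = s0 :: s1 :: sr := by
          rcases s with _ | ⟨a, t⟩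
          · exfalso
            rw [hL] at h2
            simp at h2
          · rcases t with _ | ⟨b, u⟩
            · exfalso
              rw [hL] at h2
              simp at h2
            · exact ⟨a, b, u, rfl⟩
        have hne : heap ≠ [] := by
          intro e
          rw [e] at h2
          simp at h2
        obtain ⟨P1a, P1b, P1c⟩ := heappop_spec heap hheap hne
        have hl1 : (heappopP heap).2.length = heap.length - 1 := length_heappopP_snd heap
        have hne1 : (heappopP heap).2 ≠ [] := by
          intro e
          rw [e] at hl1
          simp at hl1
          omega
        have hP1b' : (heappopP heap).2.Perm (s1 :: sr) :=
          P1b.trans (by simpa using tail_perm heap (s0 :: s1 :: sr) hperm hE0 hne)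
        have hsTail : (s1 :: sr).Pairwise (· ≤ ·) := (List.pairwise_cons.mp hs).2
        have hE1 := heads_eq _ _ hP1b' P1c hsTail
        obtain ⟨P2a, P2b, P2c⟩ := heappop_spec (heappopP heap).2 P1c hne1
        have hP2b' : (heappopP (heappopP heap).2).2.Perm sr :=
          P2b.trans (by simpa using tail_perm _ (s1 :: sr) hP1b' hE1 hne1)
        have hv1 : (heappopP heap).1 = s0 := by
          rw [P1a, hE0]
          simp [pvG_eq]
        have hv2 : (heappopP (heappopP heap).2).1 = s1 := by
          rw [P2a, hE1]
          simp [pvG_eq]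
        have hslice : PySem.List.slice (s0 :: s1 :: sr) (some 2) none = sr := by
          rw [show ((2 : Int)) = (((2 : Nat)) : Int) from rfl, PySem.List.slice_from_natCast]
          simp
        have hx : pvG (s0 :: s1 :: sr) 0 = s0 := by simp [pvG_eq]
        have hy : pvG (s0 :: s1 :: sr) 1 = s1 := by simp [pvG_eq]
        rw [hslice, hx, hy, hv1, hv2]
        set nv := s0 + s1 * 2 with hnv
        have hsr : sr.Pairwise (· ≤ ·) := (List.pairwise_cons.mp hsTail).2
        obtain ⟨IS1, IS2⟩ := insert_sorted sr nv hsr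
        have hks : insLoop sr nv sr.length 0 ≤ sr.length :=
          (insLoop_spec sr nv sr.length 0 (by omega) (by omega)
            (fun i hi => absurd hi (Nat.not_lt_zero i))).2.1
        have hins : PySem.List.insert sr ((insLoop sr nv sr.length 0 : Nat) : Int) nv =
            sr.take (insLoop sr nv sr.length 0) ++ nv :: sr.drop (insLoop sr nv sr.length 0) :=
          PySem.List.insert_natCast sr _ nv hks
        rw [hins]
        obtain ⟨PushP, PushH⟩ := heappush_spec (heappopP (heappopP heap).2).2 nv P2c
        have hperm3 : (heappushP (heappopP (heappopP heap).2).2 nv).Perm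
            (sr.take (insLoop sr nv sr.length 0) ++ nv :: sr.drop (insLoop sr nv sr.length 0)) :=
          PushP.trans ((List.Perm.cons nv hP2b').trans IS2.symm)
        rw [hperm3.length_eq, heads_eq _ _ hperm3 PushH IS1]
        by_cases hc : (sr.take (insLoop sr nv sr.length 0) ++
              nv :: sr.drop (insLoop sr nv sr.length 0)).length = 1 ∧
            pvG (sr.take (insLoop sr nv sr.length 0) ++
              nv :: sr.drop (insLoop sr nv sr.length 0)) 0 < K
        · rw [if_pos hc, if_pos hc]
        · rw [if_neg hc, if_neg hc]
          exact ihn _ _ K (count + 1) hperm3 PushH IS1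

theorem solution_eq (sco : List Int) (K : Int) : solution sco K = solution_alt sco K := by
  obtain ⟨hlen, hperm, hheap⟩ := heapify_spec sco
  rw [solution, solution_alt, hlen, PySem.List.length_sorted]
  exact loop_eq sco.length (heapifyP sco)
    (PySem.List.sorted sco (fun x => x) false) K 0
    (hperm.trans (PySem.List.sorted_perm sco (fun x => x) false).symm) hheap
    (PySem.List.sorted_pairwise sco (fun x => x))

-- ===== VERDICT (by name: the statement is the Claim_ definition above) =====
theorem solution_spec : Claim_equal_solution := by
  intro sco K _ _
  unfold Spec_solution
  exact solution_eq sco K
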